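-- pv_equiv track=rewrite | github.com/justinmelunis/evidentfit | agents/ingest/get_papers/parsing.py | extract_population_attrs
-- ===== SOURCE A (Python) =====
-- from typing import Dict, List, Optional, Any
--
-- def extract_population_attrs(text: str) -> Dict[str, Optional[str]]:
--     """Extract structured population attributes"""
--     text_lower = text.lower()
--
--     # Sex detection
--     sex = None
--     if any(word in text_lower for word in ["male", "men", "males"]):
--         if any(word in text_lower for word in ["female", "women", "females"]):
--             sex = "mixed"
--         else:
--             sex = "male"
--     elif any(word in text_lower for word in ["female", "women", "females"]):
--         sex = "female"
--
--     # Training status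
--     training_status = None
--     if any(word in text_lower for word in ["athlete", "elite", "professional", "competitive"]):
--         training_status = "athletes"
--     elif any(word in text_lower for word in ["trained", "experienced", "regular exercise"]):
--         training_status = "trained"
--     elif any(word in text_lower for word in ["untrained", "sedentary", "inactive"]):
--         training_status = "untrained"
--     elif any(word in text_lower for word in ["sedentary", "inactive", "no exercise"]):
--         training_status = "sedentary"
--
--     # Age band (approximate via MeSH-like cues)
--     age_band = None
--     if any(word in text_lower for word in ["young", "college", "university", "18-25", "18-30"]):
--         age_band = "young_adult"
--     elif any(word in text_lower for word in ["adult", "middle-aged", "30-50", "40-60"]):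
--         age_band = "adult"
--     elif any(word in text_lower for word in ["older", "elderly", "senior", "60+", "65+"]):
--         age_band = "older"
--
--     return {
--         "sex": sex,
--         "training_status": training_status,
--         "age_band": age_band
--     }
-- ===== SOURCE B (Python) =====
-- # Single pass over one flat (keyword, field, code) table with an accumulator
-- # (bitmask for sex, running minimum tier for the other two), then decode.
-- _KEYWORDS = [
--     ("male", "sex", 1), ("men", "sex", 1), ("males", "sex", 1),
--     ("female", "sex", 2), ("women", "sex", 2), ("females", "sex", 2),
--     ("athlete", "training_status", 0), ("elite", "training_status", 0),
--     ("professional", "training_status", 0), ("competitive", "training_status", 0),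
--     ("trained", "training_status", 1), ("experienced", "training_status", 1),
--     ("regular exercise", "training_status", 1),
--     ("untrained", "training_status", 2), ("sedentary", "training_status", 2),
--     ("inactive", "training_status", 2),
--     ("sedentary", "training_status", 3), ("inactive", "training_status", 3),
--     ("no exercise", "training_status", 3),
--     ("young", "age_band", 0), ("college", "age_band", 0), ("university", "age_band", 0),
--     ("18-25", "age_band", 0), ("18-30", "age_band", 0),
--     ("adult", "age_band", 1), ("middle-aged", "age_band", 1),
--     ("30-50", "age_band", 1), ("40-60", "age_band", 1),
--     ("older", "age_band", 2), ("elderly", "age_band", 2), ("senior", "age_band", 2),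
--     ("60+", "age_band", 2), ("65+", "age_band", 2),
-- ]
--
-- _SEX = (None, "male", "female", "mixed")
-- _TRAIN = ("athletes", "trained", "untrained", "sedentary")
-- _AGE = ("young_adult", "adult", "older")
--
--
-- def extract_population_attrs(text):
--     """Extract structured population attributes"""
--     t = text.lower()
--     sex_bits = 0
--     best_train = None
--     best_age = None
--     for kw, field, code in _KEYWORDS:
--         if kw in t:
--             if field == "sex":
--                 sex_bits |= code
--             elif field == "training_status":
--                 if best_train is None or code < best_train:
--                     best_train = code
--             else:
--                 if best_age is None or code < best_age:
--                     best_age = code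
--     return {
--         "sex": _SEX[sex_bits],
--         "training_status": None if best_train is None else _TRAIN[best_train],
--         "age_band": None if best_age is None else _AGE[best_age],
--     }
-- ===== Notes on version B (the rewrite author's own statement) =====
-- stated objective: alternative
-- what changed: B replaces the three hard-coded if/elif chains by one single pass over a flat (keyword, field, priority) table with an accumulator (OR-bitmask for sex, running minimum priority for training_status/age_band), decoded at the end through lookup tuples.
import Mathlib
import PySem

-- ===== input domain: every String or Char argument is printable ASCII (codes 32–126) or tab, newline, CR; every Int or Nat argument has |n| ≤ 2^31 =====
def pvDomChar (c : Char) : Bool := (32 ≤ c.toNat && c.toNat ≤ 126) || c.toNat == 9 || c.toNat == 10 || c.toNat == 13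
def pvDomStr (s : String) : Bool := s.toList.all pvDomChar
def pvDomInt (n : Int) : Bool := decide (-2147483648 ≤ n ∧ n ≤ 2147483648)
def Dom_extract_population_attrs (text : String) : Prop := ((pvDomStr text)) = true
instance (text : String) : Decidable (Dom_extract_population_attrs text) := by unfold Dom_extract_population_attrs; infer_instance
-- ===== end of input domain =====

-- B does one pass over a flat (keyword, field, priority) table with an accumulator
-- instead of A's three if/elif chains; alternative decomposition, same cost.

-- ===== PORT A =====
-- transliteration of Python's `any(word in text_lower for word in ws)`
def pvAnyIn (ws : List String) (tl : String) : Bool := ws.any (fun w => PySem.Str.isIn w tl)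

def extract_population_attrs (text : String) : List (String × Option String) :=
  let text_lower := PySem.Str.lower text
  let sex : Option String :=
    if pvAnyIn ["male", "men", "males"] text_lower then
      if pvAnyIn ["female", "women", "females"] text_lower then some "mixed" else some "male"
    else if pvAnyIn ["female", "women", "females"] text_lower then some "female"
    else none
  let training_status : Option String :=
    if pvAnyIn ["athlete", "elite", "professional", "competitive"] text_lower then some "athletes"
    else if pvAnyIn ["trained", "experienced", "regular exercise"] text_lower then some "trained"
    else if pvAnyIn ["untrained", "sedentary", "inactive"] text_lower then some "untrained"
    else if pvAnyIn ["sedentary", "inactive", "no exercise"] text_lower then some "sedentary"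
    else none
  let age_band : Option String :=
    if pvAnyIn ["young", "college", "university", "18-25", "18-30"] text_lower then some "young_adult"
    else if pvAnyIn ["adult", "middle-aged", "30-50", "40-60"] text_lower then some "adult"
    else if pvAnyIn ["older", "elderly", "senior", "60+", "65+"] text_lower then some "older"
    else none
  [("sex", sex), ("training_status", training_status), ("age_band", age_band)]

-- ===== PORT B =====
-- the flat keyword table of Source B: (keyword, field name, code)
def pvFlatKeywords : List (String × String × Nat) :=
  [("male", "sex", 1), ("men", "sex", 1), ("males", "sex", 1),
   ("female", "sex", 2), ("women", "sex", 2), ("females", "sex", 2),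
   ("athlete", "training_status", 0), ("elite", "training_status", 0),
   ("professional", "training_status", 0), ("competitive", "training_status", 0),
   ("trained", "training_status", 1), ("experienced", "training_status", 1),
   ("regular exercise", "training_status", 1),
   ("untrained", "training_status", 2), ("sedentary", "training_status", 2),
   ("inactive", "training_status", 2),
   ("sedentary", "training_status", 3), ("inactive", "training_status", 3),
   ("no exercise", "training_status", 3),
   ("young", "age_band", 0), ("college", "age_band", 0), ("university", "age_band", 0),
   ("18-25", "age_band", 0), ("18-30", "age_band", 0),
   ("adult", "age_band", 1), ("middle-aged", "age_band", 1),
   ("30-50", "age_band", 1), ("40-60", "age_band", 1),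
   ("older", "age_band", 2), ("elderly", "age_band", 2), ("senior", "age_band", 2),
   ("60+", "age_band", 2), ("65+", "age_band", 2)]

-- `best is None or code < best` followed by assignment
def pvBest (best : Option Nat) (code : Nat) : Option Nat :=
  match best with
  | none => some code
  | some b => if code < b then some code else some b

-- the body of Source B's for-loop over the flat table
def pvStep (t : String) (acc : Nat × Option Nat × Option Nat) (row : String × String × Nat) :
    Nat × Option Nat × Option Nat :=
  if PySem.Str.isIn row.1 t then
    if row.2.1 == "sex" then (acc.1 ||| row.2.2, acc.2.1, acc.2.2)
    else if row.2.1 == "training_status" then (acc.1, pvBest acc.2.1 row.2.2, acc.2.2)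
    else (acc.1, acc.2.1, pvBest acc.2.2 row.2.2)
  else acc

def pvSexTable : List (Option String) := [none, some "male", some "female", some "mixed"]
def pvTrainTable : List String := ["athletes", "trained", "untrained", "sedentary"]
def pvAgeTable : List String := ["young_adult", "adult", "older"]

def extract_population_attrs_alt (text : String) : List (String × Option String) :=
  let t := PySem.Str.lower text
  let acc := pvFlatKeywords.foldl (pvStep t) (0, none, none)
  -- tuple indexing _SEX[sex_bits] etc.: the index is always in range, so getD is exact
  [("sex", pvSexTable.getD acc.1 none),
   ("training_status", acc.2.1.map (fun b => pvTrainTable.getD b "")),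
   ("age_band", acc.2.2.map (fun b => pvAgeTable.getD b ""))]

-- ===== PRECONDITION & SPEC =====
def Spec_extract_population_attrs (text : String) (out : List (String × Option String)) : Prop := out = extract_population_attrs_alt text
instance (text : String) (out : List (String × Option String)) : Decidable (Spec_extract_population_attrs text out) := by unfold Spec_extract_population_attrs; infer_instance

-- ===== CLAIM (what is proved, stated in full; the proofs are below) =====
def Claim_equal_extract_population_attrs : Prop := ∀ (text : String), Dom_extract_population_attrs text → Spec_extract_population_attrs text (extract_population_attrs text)

-- ===== LEMMAS AND PROOFS =====

-- the three independent component-update functions of the loop step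
def pvG1 (t : String) : Nat → (String × String × Nat) → Nat :=
  fun n row => if PySem.Str.isIn row.1 t && (row.2.1 == "sex") then n ||| row.2.2 else n
def pvG2 (t : String) : Option Nat → (String × String × Nat) → Option Nat :=
  fun n row => if PySem.Str.isIn row.1 t && (row.2.1 == "training_status") then pvBest n row.2.2 else n
def pvG3 (t : String) : Option Nat → (String × String × Nat) → Option Nat :=
  fun n row => if PySem.Str.isIn row.1 t && !(row.2.1 == "sex") && !(row.2.1 == "training_status") then pvBest n row.2.2 else n

-- the table, segmented by field and tier
def pvRowsSexM : List (String × String × Nat) := [("male", "sex", 1), ("men", "sex", 1), ("males", "sex", 1)]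
def pvRowsSexF : List (String × String × Nat) := [("female", "sex", 2), ("women", "sex", 2), ("females", "sex", 2)]
def pvRowsSex : List (String × String × Nat) := pvRowsSexM ++ pvRowsSexF
def pvRowsT0 : List (String × String × Nat) := [("athlete", "training_status", 0), ("elite", "training_status", 0), ("professional", "training_status", 0), ("competitive", "training_status", 0)]
def pvRowsT1 : List (String × String × Nat) := [("trained", "training_status", 1), ("experienced", "training_status", 1), ("regular exercise", "training_status", 1)]
def pvRowsT2 : List (String × String × Nat) := [("untrained", "training_status", 2), ("sedentary", "training_status", 2), ("inactive", "training_status", 2)]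
def pvRowsT3 : List (String × String × Nat) := [("sedentary", "training_status", 3), ("inactive", "training_status", 3), ("no exercise", "training_status", 3)]
def pvRowsTrain : List (String × String × Nat) := pvRowsT0 ++ pvRowsT1 ++ pvRowsT2 ++ pvRowsT3
def pvRowsA0 : List (String × String × Nat) := [("young", "age_band", 0), ("college", "age_band", 0), ("university", "age_band", 0), ("18-25", "age_band", 0), ("18-30", "age_band", 0)]
def pvRowsA1 : List (String × String × Nat) := [("adult", "age_band", 1), ("middle-aged", "age_band", 1), ("30-50", "age_band", 1), ("40-60", "age_band", 1)]
def pvRowsA2 : List (String × String × Nat) := [("older", "age_band", 2), ("elderly", "age_band", 2), ("senior", "age_band", 2), ("60+", "age_band", 2), ("65+", "age_band", 2)]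
def pvRowsAge : List (String × String × Nat) := pvRowsA0 ++ pvRowsA1 ++ pvRowsA2

theorem pvTab : pvFlatKeywords = pvRowsSex ++ pvRowsTrain ++ pvRowsAge := rfl

-- projections of one loop step
theorem pvStep_fst (t : String) (acc : Nat × Option Nat × Option Nat) (row : String × String × Nat) :
    (pvStep t acc row).1 = pvG1 t acc.1 row := by
  unfold pvStep pvG1; split_ifs with h1 h2 h3 h4 <;> simp_all

theorem pvStep_snd (t : String) (acc : Nat × Option Nat × Option Nat) (row : String × String × Nat) :
    (pvStep t acc row).2.1 = pvG2 t acc.2.1 row := by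
  unfold pvStep pvG2; split_ifs with h1 h2 h3 h4 <;> simp_all

theorem pvStep_thd (t : String) (acc : Nat × Option Nat × Option Nat) (row : String × String × Nat) :
    (pvStep t acc row).2.2 = pvG3 t acc.2.2 row := by
  unfold pvStep pvG3; split_ifs with h1 h2 h3 h4 <;> simp_all

-- the fold's components are independent folds
theorem fold_fst (t : String) (l : List (String × String × Nat)) (acc : Nat × Option Nat × Option Nat) :
    (l.foldl (pvStep t) acc).1 = l.foldl (pvG1 t) acc.1 := by
  induction l generalizing acc with
  | nil => rfl
  | cons r l ih => simp [List.foldl, ih, pvStep_fst]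

theorem fold_snd (t : String) (l : List (String × String × Nat)) (acc : Nat × Option Nat × Option Nat) :
    (l.foldl (pvStep t) acc).2.1 = l.foldl (pvG2 t) acc.2.1 := by
  induction l generalizing acc with
  | nil => rfl
  | cons r l ih => simp [List.foldl, ih, pvStep_snd]

theorem fold_thd (t : String) (l : List (String × String × Nat)) (acc : Nat × Option Nat × Option Nat) :
    (l.foldl (pvStep t) acc).2.2 = l.foldl (pvG3 t) acc.2.2 := by
  induction l generalizing acc with
  | nil => rfl
  | cons r l ih => simp [List.foldl, ih, pvStep_thd]

-- rows of another field are a no-op for each component fold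
theorem skip_g1_train (t : String) (acc : Nat) : pvRowsTrain.foldl (pvG1 t) acc = acc := by
  simp [pvRowsTrain, pvRowsT0, pvRowsT1, pvRowsT2, pvRowsT3, pvG1]
theorem skip_g1_age (t : String) (acc : Nat) : pvRowsAge.foldl (pvG1 t) acc = acc := by
  simp [pvRowsAge, pvRowsA0, pvRowsA1, pvRowsA2, pvG1]
theorem skip_g2_sex (t : String) (acc : Option Nat) : pvRowsSex.foldl (pvG2 t) acc = acc := by
  simp [pvRowsSex, pvRowsSexM, pvRowsSexF, pvG2]
theorem skip_g2_age (t : String) (acc : Option Nat) : pvRowsAge.foldl (pvG2 t) acc = acc := by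
  simp [pvRowsAge, pvRowsA0, pvRowsA1, pvRowsA2, pvG2]
theorem skip_g3_sex (t : String) (acc : Option Nat) : pvRowsSex.foldl (pvG3 t) acc = acc := by
  simp [pvRowsSex, pvRowsSexM, pvRowsSexF, pvG3]
theorem skip_g3_train (t : String) (acc : Option Nat) : pvRowsTrain.foldl (pvG3 t) acc = acc := by
  simp [pvRowsTrain, pvRowsT0, pvRowsT1, pvRowsT2, pvRowsT3, pvG3]

-- repeated updates with the same code collapse
theorem pvBest_idem (a : Option Nat) (c : Nat) : pvBest (pvBest a c) c = pvBest a c := by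
  cases a with
  | none => simp [pvBest]
  | some b =>
    simp only [pvBest]
    split_ifs with h <;> simp [h]

-- a tier of rows (same field, same code) acts as a single conditional update
theorem tier_sexM (t : String) (acc : Nat) :
    pvRowsSexM.foldl (pvG1 t) acc = if pvAnyIn ["male", "men", "males"] t then acc ||| 1 else acc := by
  simp only [pvRowsSexM, List.foldl_cons, List.foldl_nil, pvG1, String.reduceBEq, Bool.and_true,
    pvAnyIn, List.any_cons, List.any_nil, Bool.or_false]
  generalize PySem.Str.isIn "male" t = b1
  generalize PySem.Str.isIn "men" t = b2
  generalize PySem.Str.isIn "males" t = b3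
  cases b1 <;> cases b2 <;> cases b3 <;> simp
theorem tier_sexF (t : String) (acc : Nat) :
    pvRowsSexF.foldl (pvG1 t) acc = if pvAnyIn ["female", "women", "females"] t then acc ||| 2 else acc := by
  simp only [pvRowsSexF, List.foldl_cons, List.foldl_nil, pvG1, String.reduceBEq, Bool.and_true,
    pvAnyIn, List.any_cons, List.any_nil, Bool.or_false]
  generalize PySem.Str.isIn "female" t = b1
  generalize PySem.Str.isIn "women" t = b2
  generalize PySem.Str.isIn "females" t = b3
  cases b1 <;> cases b2 <;> cases b3 <;> simp
theorem tier_t0 (t : String) (acc : Option Nat) :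
    pvRowsT0.foldl (pvG2 t) acc = if pvAnyIn ["athlete", "elite", "professional", "competitive"] t then pvBest acc 0 else acc := by
  simp only [pvRowsT0, List.foldl_cons, List.foldl_nil, pvG2, String.reduceBEq, Bool.and_true,
    pvAnyIn, List.any_cons, List.any_nil, Bool.or_false]
  generalize PySem.Str.isIn "athlete" t = b1
  generalize PySem.Str.isIn "elite" t = b2
  generalize PySem.Str.isIn "professional" t = b3
  generalize PySem.Str.isIn "competitive" t = b4
  cases b1 <;> cases b2 <;> cases b3 <;> cases b4 <;> simp [pvBest_idem]
theorem tier_t1 (t : String) (acc : Option Nat) :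
    pvRowsT1.foldl (pvG2 t) acc = if pvAnyIn ["trained", "experienced", "regular exercise"] t then pvBest acc 1 else acc := by
  simp only [pvRowsT1, List.foldl_cons, List.foldl_nil, pvG2, String.reduceBEq, Bool.and_true,
    pvAnyIn, List.any_cons, List.any_nil, Bool.or_false]
  generalize PySem.Str.isIn "trained" t = b1
  generalize PySem.Str.isIn "experienced" t = b2
  generalize PySem.Str.isIn "regular exercise" t = b3
  cases b1 <;> cases b2 <;> cases b3 <;> simp [pvBest_idem]
theorem tier_t2 (t : String) (acc : Option Nat) :
    pvRowsT2.foldl (pvG2 t) acc = if pvAnyIn ["untrained", "sedentary", "inactive"] t then pvBest acc 2 else acc := by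
  simp only [pvRowsT2, List.foldl_cons, List.foldl_nil, pvG2, String.reduceBEq, Bool.and_true,
    pvAnyIn, List.any_cons, List.any_nil, Bool.or_false]
  generalize PySem.Str.isIn "untrained" t = b1
  generalize PySem.Str.isIn "sedentary" t = b2
  generalize PySem.Str.isIn "inactive" t = b3
  cases b1 <;> cases b2 <;> cases b3 <;> simp [pvBest_idem]
theorem tier_t3 (t : String) (acc : Option Nat) :
    pvRowsT3.foldl (pvG2 t) acc = if pvAnyIn ["sedentary", "inactive", "no exercise"] t then pvBest acc 3 else acc := by
  simp only [pvRowsT3, List.foldl_cons, List.foldl_nil, pvG2, String.reduceBEq, Bool.and_true,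
    pvAnyIn, List.any_cons, List.any_nil, Bool.or_false]
  generalize PySem.Str.isIn "sedentary" t = b1
  generalize PySem.Str.isIn "inactive" t = b2
  generalize PySem.Str.isIn "no exercise" t = b3
  cases b1 <;> cases b2 <;> cases b3 <;> simp [pvBest_idem]
theorem tier_a0 (t : String) (acc : Option Nat) :
    pvRowsA0.foldl (pvG3 t) acc = if pvAnyIn ["young", "college", "university", "18-25", "18-30"] t then pvBest acc 0 else acc := by
  simp only [pvRowsA0, List.foldl_cons, List.foldl_nil, pvG3, String.reduceBEq, Bool.and_true,
    Bool.not_false, pvAnyIn, List.any_cons, List.any_nil, Bool.or_false]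
  generalize PySem.Str.isIn "young" t = b1
  generalize PySem.Str.isIn "college" t = b2
  generalize PySem.Str.isIn "university" t = b3
  generalize PySem.Str.isIn "18-25" t = b4
  generalize PySem.Str.isIn "18-30" t = b5
  cases b1 <;> cases b2 <;> cases b3 <;> cases b4 <;> cases b5 <;> simp [pvBest_idem]
theorem tier_a1 (t : String) (acc : Option Nat) :
    pvRowsA1.foldl (pvG3 t) acc = if pvAnyIn ["adult", "middle-aged", "30-50", "40-60"] t then pvBest acc 1 else acc := by
  simp only [pvRowsA1, List.foldl_cons, List.foldl_nil, pvG3, String.reduceBEq, Bool.and_true,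
    Bool.not_false, pvAnyIn, List.any_cons, List.any_nil, Bool.or_false]
  generalize PySem.Str.isIn "adult" t = b1
  generalize PySem.Str.isIn "middle-aged" t = b2
  generalize PySem.Str.isIn "30-50" t = b3
  generalize PySem.Str.isIn "40-60" t = b4
  cases b1 <;> cases b2 <;> cases b3 <;> cases b4 <;> simp [pvBest_idem]
theorem tier_a2 (t : String) (acc : Option Nat) :
    pvRowsA2.foldl (pvG3 t) acc = if pvAnyIn ["older", "elderly", "senior", "60+", "65+"] t then pvBest acc 2 else acc := by
  simp only [pvRowsA2, List.foldl_cons, List.foldl_nil, pvG3, String.reduceBEq, Bool.and_true,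
    Bool.not_false, pvAnyIn, List.any_cons, List.any_nil, Bool.or_false]
  generalize PySem.Str.isIn "older" t = b1
  generalize PySem.Str.isIn "elderly" t = b2
  generalize PySem.Str.isIn "senior" t = b3
  generalize PySem.Str.isIn "60+" t = b4
  generalize PySem.Str.isIn "65+" t = b5
  cases b1 <;> cases b2 <;> cases b3 <;> cases b4 <;> cases b5 <;> simp [pvBest_idem]

-- the three components of B's fold, reduced to tier conditionals
theorem comp_sex (t : String) :
    pvSexTable.getD (pvFlatKeywords.foldl (pvStep t) (0, none, none)).1 none =
      (if pvAnyIn ["male", "men", "males"] t then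
        if pvAnyIn ["female", "women", "females"] t then some "mixed" else some "male"
       else if pvAnyIn ["female", "women", "females"] t then some "female" else none) := by
  rw [fold_fst, pvTab, List.foldl_append, List.foldl_append, skip_g1_age, pvRowsSex,
    List.foldl_append, tier_sexM, tier_sexF]
  by_cases h1 : pvAnyIn ["male", "men", "males"] t <;>
    by_cases h2 : pvAnyIn ["female", "women", "females"] t <;>
    simp [h1, h2, skip_g1_train, pvSexTable]
theorem comp_train (t : String) :
    Option.map (fun b => pvTrainTable.getD b "") (pvFlatKeywords.foldl (pvStep t) (0, none, none)).2.1 =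
      (if pvAnyIn ["athlete", "elite", "professional", "competitive"] t then some "athletes"
       else if pvAnyIn ["trained", "experienced", "regular exercise"] t then some "trained"
       else if pvAnyIn ["untrained", "sedentary", "inactive"] t then some "untrained"
       else if pvAnyIn ["sedentary", "inactive", "no exercise"] t then some "sedentary"
       else none) := by
  rw [fold_snd, pvTab, List.foldl_append, List.foldl_append, skip_g2_sex, pvRowsTrain,
    List.foldl_append, List.foldl_append, List.foldl_append, tier_t0, tier_t1]
  by_cases h1 : pvAnyIn ["athlete", "elite", "professional", "competitive"] t <;>
    by_cases h2 : pvAnyIn ["trained", "experienced", "regular exercise"] t <;>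
    by_cases h3 : pvAnyIn ["untrained", "sedentary", "inactive"] t <;>
    by_cases h4 : pvAnyIn ["sedentary", "inactive", "no exercise"] t <;>
    simp [h1, h2, h3, h4, tier_t2, tier_t3, skip_g2_age, pvBest, pvTrainTable]
theorem comp_age (t : String) :
    Option.map (fun b => pvAgeTable.getD b "") (pvFlatKeywords.foldl (pvStep t) (0, none, none)).2.2 =
      (if pvAnyIn ["young", "college", "university", "18-25", "18-30"] t then some "young_adult"
       else if pvAnyIn ["adult", "middle-aged", "30-50", "40-60"] t then some "adult"
       else if pvAnyIn ["older", "elderly", "senior", "60+", "65+"] t then some "older"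
       else none) := by
  rw [fold_thd, pvTab, List.foldl_append, List.foldl_append, skip_g3_sex, skip_g3_train,
    pvRowsAge, List.foldl_append, List.foldl_append, tier_a0, tier_a1]
  by_cases h1 : pvAnyIn ["young", "college", "university", "18-25", "18-30"] t <;>
    by_cases h2 : pvAnyIn ["adult", "middle-aged", "30-50", "40-60"] t <;>
    by_cases h3 : pvAnyIn ["older", "elderly", "senior", "60+", "65+"] t <;>
    simp [h1, h2, h3, tier_a2, pvBest, pvAgeTable]

-- ===== VERDICT (by name: the statement is the Claim_ definition above) =====
theorem extract_population_attrs_spec : Claim_equal_extract_population_attrs := by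
  intro text _
  unfold Spec_extract_population_attrs extract_population_attrs extract_population_attrs_alt
  simp only [comp_sex, comp_train, comp_age]
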